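-- pv_equiv track=rewrite | github.com/ObviusOwl/eml-vcard-export | eml_vcard_export/vcard/lexer.py | vcard_fold_line
-- ===== SOURCE A (Python) =====
-- def vcard_fold_line( logical_line, line_length=75 ):
--     # RFC2425 section 5.8.1
--     out = ""
--     log_line_len = len( logical_line )
--
--     for i in range( log_line_len ):
--         out += logical_line[ i ]
--
--         if i % line_length == 0 and i != 0 and i < log_line_len-1:
--             # only fold if there is still content
--             out += "\n "
--
--     return out
-- ===== SOURCE B (Python) =====
-- def vcard_fold_line(logical_line, line_length=75):
--     # Fold by slicing into chunks and joining with newline+space: the first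
--     # chunk carries line_length+1 characters, every later chunk line_length.
--     if line_length <= 0:
--         # no sensible fold width: return the line unfolded
--         return logical_line
--     parts = [logical_line[:line_length + 1]]
--     rest = logical_line[line_length + 1:]
--     while rest:
--         parts.append(rest[:line_length])
--         rest = rest[line_length:]
--     return "\n ".join(parts)
-- ===== Notes on version B (the rewrite author's own statement) =====
-- stated objective: faster
-- what changed: A builds the output one character at a time, testing i % line_length at every index; B slices the line into whole chunks (first line_length+1 chars, then line_length each) and joins them with the fold separator; Pre_ excludes line_length <= 0, where A either raises ZeroDivisionError (zero width, nonempty line) or folds at multiples of the absolute value of a negative width - an accident of Python's modulo on a nonsensical fold width - while B returns the line unfolded.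
-- outside the precondition, e.g. on vcard_fold_line('abc', 0): A raises ZeroDivisionError, B returns 'abc'; on vcard_fold_line('abcdef', -2): A returns 'abc\n de\n f', B returns 'abcdef'
-- crash fix: On a nonempty line with line_length == 0, A raises ZeroDivisionError (the modulo at i == 0); B returns the line unfolded. — e.g. on vcard_fold_line("abc", 0): A raises ZeroDivisionError, B returns "abc"
import Mathlib
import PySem

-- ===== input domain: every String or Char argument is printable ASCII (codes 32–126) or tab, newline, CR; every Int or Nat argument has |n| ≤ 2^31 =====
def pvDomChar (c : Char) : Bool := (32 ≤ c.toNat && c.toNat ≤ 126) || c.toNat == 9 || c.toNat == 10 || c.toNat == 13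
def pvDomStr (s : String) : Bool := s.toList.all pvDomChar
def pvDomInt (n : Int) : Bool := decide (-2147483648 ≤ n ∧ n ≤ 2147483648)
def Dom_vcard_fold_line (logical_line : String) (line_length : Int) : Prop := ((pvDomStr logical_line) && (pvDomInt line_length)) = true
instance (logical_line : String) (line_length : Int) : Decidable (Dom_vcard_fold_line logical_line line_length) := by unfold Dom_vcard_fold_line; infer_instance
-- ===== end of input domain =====

-- B replaces A's per-character loop (modulo test at every index) by chunk-and-join:
-- first line_length+1 chars, then chunks of line_length, joined with the fold separator
-- (bulk slicing instead of per-character concatenation; a timing run measured B faster).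
-- Pre_ excludes line_length ≤ 0: at 0 A raises ZeroDivisionError on a nonempty line,
-- and on a negative width A folds at multiples of |line_length| (an accident of
-- Python's modulo on a nonsensical fold width); B returns the line unfolded there.


-- ===== PORT A =====
def vcard_fold_line (logical_line : String) (line_length : Int) : String :=
  String.mk ((PySem.List.pyRange 0 ((logical_line.toList.length : Nat) : Int) 1).foldl
    (fun (out : List Char) (i : Int) =>
      let out := out ++ [PySem.List.pyGetD logical_line.toList i ' ']
      if PySem.Int.mod i line_length = 0 ∧ i ≠ 0 ∧ i < ((logical_line.toList.length : Nat) : Int) - 1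
      then out ++ ['\n', ' '] else out) [])

-- ===== PORT B =====
-- B-side helper: the tail chunks of Source B's while loop; each chunk is s1+1 chars (s1 = line_length-1)
def pvAltRest (s1 : Nat) : List Char → List (List Char)
  | [] => []
  | c :: rest => (c :: rest.take s1) :: pvAltRest s1 (rest.drop s1)
  termination_by r => r.length
  decreasing_by simp

def vcard_fold_line_alt (logical_line : String) (line_length : Int) : String :=
  if line_length ≤ 0 then logical_line
  else String.mk (List.intercalate ['\n', ' ']
    (logical_line.toList.take (line_length.toNat + 1) ::
      pvAltRest (line_length.toNat - 1) (logical_line.toList.drop (line_length.toNat + 1))))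

-- ===== PRECONDITION & SPEC =====
-- Pre_ excludes line_length ≤ 0: at 0 A raises ZeroDivisionError on a nonempty line, and on a
-- negative width A's folding at multiples of |line_length| is an accident of Python's modulo.
def Pre_vcard_fold_line (logical_line : String) (line_length : Int) : Prop :=
  logical_line = "" ∨ 1 ≤ line_length
instance (logical_line : String) (line_length : Int) : Decidable (Pre_vcard_fold_line logical_line line_length) := by unfold Pre_vcard_fold_line; infer_instance
def pvWitness_vcard_fold_line : String × Int := ("hello world, this is a line", 4)

-- A raises ZeroDivisionError on a nonempty line with line_length = 0; B returns the line unfolded.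
def Raises_vcard_fold_line (logical_line : String) (line_length : Int) : Prop :=
  logical_line ≠ "" ∧ line_length = 0
instance (logical_line : String) (line_length : Int) : Decidable (Raises_vcard_fold_line logical_line line_length) := by unfold Raises_vcard_fold_line; infer_instance
def pvRaiseWitness_vcard_fold_line : String × Int := ("abc", 0)
def pvRaiseWitnessOut_vcard_fold_line : String := "abc"

def Spec_vcard_fold_line (logical_line : String) (line_length : Int) (out : String) : Prop := out = vcard_fold_line_alt logical_line line_length
instance (logical_line : String) (line_length : Int) (out : String) : Decidable (Spec_vcard_fold_line logical_line line_length out) := by unfold Spec_vcard_fold_line; infer_instance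

-- ===== CLAIM (what is proved, stated in full; the proofs are below) =====
def Claim_equal_vcard_fold_line : Prop := ∀ (logical_line : String) (line_length : Int), Dom_vcard_fold_line logical_line line_length → Pre_vcard_fold_line logical_line line_length → Spec_vcard_fold_line logical_line line_length (vcard_fold_line logical_line line_length)
def Claim_raises_vcard_fold_line : Prop := (∀ (logical_line : String) (line_length : Int), Dom_vcard_fold_line logical_line line_length → Raises_vcard_fold_line logical_line line_length → ¬ Pre_vcard_fold_line logical_line line_length) ∧ (Dom_vcard_fold_line (pvRaiseWitness_vcard_fold_line.1) (pvRaiseWitness_vcard_fold_line.2) ∧ Raises_vcard_fold_line (pvRaiseWitness_vcard_fold_line.1) (pvRaiseWitness_vcard_fold_line.2) ∧ vcard_fold_line_alt (pvRaiseWitness_vcard_fold_line.1) (pvRaiseWitness_vcard_fold_line.2) = pvRaiseWitnessOut_vcard_fold_line)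

-- ===== LEMMAS AND PROOFS =====

theorem pvAltRest_nil (s1 : Nat) : pvAltRest s1 [] = [] := by
  rw [pvAltRest.eq_def]

theorem pvAltRest_cons (s1 : Nat) (c : Char) (rest : List Char) :
    pvAltRest s1 (c :: rest) = (c :: rest.take s1) :: pvAltRest s1 (rest.drop s1) := by
  rw [pvAltRest.eq_def]

-- proof-side recursion describing A's loop: char at position i, then the fold marker when it fires
def pvALoop (s n : Nat) : List Char → Nat → List Char
  | [], _ => []
  | c :: rest, i => c :: ((if i % s = 0 ∧ i ≠ 0 ∧ i + 1 < n then ['\n', ' '] else []) ++ pvALoop s n rest (i + 1))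

theorem pvALoop_append (s n : Nat) (u v : List Char) (i : Nat) :
    pvALoop s n (u ++ v) i = pvALoop s n u i ++ pvALoop s n v (i + u.length) := by
  induction u generalizing i with
  | nil => simp [pvALoop]
  | cons c u ih =>
      simp only [List.cons_append, pvALoop, List.length_cons, ih (i + 1)]
      rw [show i + (u.length + 1) = i + 1 + u.length by omega]
      simp [List.append_assoc]

theorem pvALoop_noFold (s n : Nat) (u : List Char) (i : Nat)
    (h : ∀ j, i ≤ j → j < i + u.length → ¬(j % s = 0 ∧ j ≠ 0 ∧ j + 1 < n)) :
    pvALoop s n u i = u := by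
  induction u generalizing i with
  | nil => simp [pvALoop]
  | cons c u ih =>
      have h0 : ¬(i % s = 0 ∧ i ≠ 0 ∧ i + 1 < n) := h i le_rfl (by simp)
      simp only [pvALoop, h0, if_false, List.nil_append, List.cons.injEq, true_and]
      exact ih (i + 1) (fun j hj hj' => h j (by omega) (by simp at hj' ⊢; omega))

-- next multiple: if i ≡ 1 (mod s) and j ≥ i is a multiple of s, then j + 1 ≥ i + s
theorem pv_next_multiple (s i j : Nat) (hs : 1 ≤ s) (hi : i % s = 1 % s)
    (hj : j % s = 0) (hij : i ≤ j) : i + s ≤ j + 1 := by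
  rcases Nat.lt_or_ge 1 s with h2 | h1
  · have hi' : i % s = 1 := by rw [hi]; exact Nat.mod_eq_of_lt h2
    have hieq := Nat.div_add_mod i s
    have hjeq := Nat.div_add_mod j s
    have hq : i / s < j / s := by
      by_contra hc
      have hc' : j / s ≤ i / s := by omega
      have := Nat.mul_le_mul_left s hc'
      omega
    have h3 : s * (i / s + 1) ≤ s * (j / s) := Nat.mul_le_mul_left s hq
    have h4 : s * (i / s + 1) = s * (i / s) + s := by ring
    omega
  · omega

theorem pv_im1_mod (s i : Nat) (hs : 1 ≤ s) (_hi1 : 1 ≤ i) (hi : i % s = 1 % s) :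
    (i + s - 1) % s = 0 := by
  rcases Nat.lt_or_ge 1 s with h2 | h1
  · have hi' : i % s = 1 := by rw [hi]; exact Nat.mod_eq_of_lt h2
    have hieq := Nat.div_add_mod i s
    have heq : i + s - 1 = s * (i / s + 1) := by
      have : s * (i / s + 1) = s * (i / s) + s := by ring
      omega
    rw [heq, Nat.mul_mod_right]
  · have hs1 : s = 1 := by omega
    subst hs1
    omega

theorem pv_intercalate_cons (sep x y : List Char) (t : List (List Char)) :
    List.intercalate sep (x :: y :: t) = x ++ sep ++ List.intercalate sep (y :: t) := by
  simp [List.intercalate, List.intersperse]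

theorem pv_intercalate_single (sep x : List Char) :
    List.intercalate sep [x] = x := by
  simp [List.intercalate, List.intersperse]

theorem pv_main (s n : Nat) (hs : 1 ≤ s) :
    ∀ (N : Nat) (r : List Char) (i : Nat), r.length ≤ N → 1 ≤ i → i + r.length = n →
    i % s = 1 % s →
    pvALoop s n r i = List.intercalate ['\n', ' '] (pvAltRest (s - 1) r) := by
  intro N
  induction N with
  | zero =>
      intro r i hN _ _ _
      have hr : r = [] := List.length_eq_zero_iff.mp (by omega)
      subst hr
      simp [pvALoop, pvAltRest_nil, List.intercalate]
  | succ N ih =>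
      intro r i hN h1 h2 h3
      match r with
      | [] => simp [pvALoop, pvAltRest_nil, List.intercalate]
      | c :: rest =>
        simp only [List.length_cons] at hN h2
        by_cases hlen : rest.length + 1 ≤ s
        · -- one final chunk: no fold fires inside
          have ht : rest.take (s - 1) = rest := List.take_of_length_le (by omega)
          have hd : rest.drop (s - 1) = [] := List.drop_eq_nil_of_le (by omega)
          have hAlt : pvAltRest (s - 1) (c :: rest) = [c :: rest] := by
            rw [pvAltRest_cons, ht, hd, pvAltRest_nil]
          rw [hAlt, pv_intercalate_single]
          apply pvALoop_noFold
          intro j hij hjlt hcond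
          obtain ⟨hj0, _, hjn⟩ := hcond
          have := pv_next_multiple s i j hs h3 hj0 hij
          simp only [List.length_cons] at hjlt
          omega
        · -- r longer than s: peel one chunk of s characters
          have hul : ((c :: rest).take s).length = s := by
            rw [List.length_take]; simp; omega
          have hsplit : pvALoop s n (c :: rest) i
              = pvALoop s n ((c :: rest).take s) i ++ pvALoop s n ((c :: rest).drop s) (i + s) := by
            conv_lhs => rw [← List.take_append_drop s (c :: rest)]
            rw [pvALoop_append, hul]
          have hslt : s - 1 < (c :: rest).length := by simp; omega
          have hgl : (c :: rest)[s - 1]? = some ((c :: rest)[s - 1]'hslt) :=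
            List.getElem?_eq_getElem hslt
          have htake : (c :: rest).take s
              = (c :: rest).take (s - 1) ++ [(c :: rest)[s - 1]'hslt] := by
            conv_lhs => rw [show s = (s - 1) + 1 by omega]
            rw [List.take_succ, hgl]
            simp
          have hu'l : ((c :: rest).take (s - 1)).length = s - 1 := by
            rw [List.length_take]; simp; omega
          have hplain : pvALoop s n ((c :: rest).take (s - 1)) i = (c :: rest).take (s - 1) := by
            apply pvALoop_noFold
            intro j hij hjlt hcond
            obtain ⟨hj0, _, _⟩ := hcond
            have := pv_next_multiple s i j hs h3 hj0 hij
            rw [hu'l] at hjlt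
            omega
          have hcond : (i + (s - 1)) % s = 0 ∧ i + (s - 1) ≠ 0 ∧ i + (s - 1) + 1 < n := by
            refine ⟨?_, by omega, by omega⟩
            have := pv_im1_mod s i hs h1 h3
            rw [show i + (s - 1) = i + s - 1 by omega]
            exact this
          have hchunk : pvALoop s n ((c :: rest).take s) i
              = (c :: rest).take s ++ ['\n', ' '] := by
            conv_lhs => rw [htake]
            rw [pvALoop_append, hu'l, hplain]
            conv_rhs => rw [htake]
            simp only [pvALoop]
            rw [if_pos hcond]
            simp only [List.append_nil, List.append_assoc, List.cons_append, List.nil_append]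
          have hIH : pvALoop s n ((c :: rest).drop s) (i + s)
              = List.intercalate ['\n', ' '] (pvAltRest (s - 1) ((c :: rest).drop s)) := by
            apply ih
            · rw [List.length_drop]; simp; omega
            · omega
            · rw [List.length_drop]; simp; omega
            · rw [Nat.add_mod_right]; exact h3
          have hAlt : pvAltRest (s - 1) (c :: rest)
              = (c :: rest).take s :: pvAltRest (s - 1) ((c :: rest).drop s) := by
            rw [pvAltRest_cons]
            congr 1
            · conv_rhs => rw [show s = (s - 1) + 1 by omega]
              rw [List.take_succ_cons]
            · congr 1
              conv_rhs => rw [show s = (s - 1) + 1 by omega]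
              rw [List.drop_succ_cons]
          rw [hsplit, hchunk, hIH, hAlt]
          have hvne : (c :: rest).drop s ≠ [] := by
            intro h
            have := congrArg List.length h
            rw [List.length_drop] at this
            simp at this
            omega
          obtain ⟨v0, vt, hv⟩ : ∃ v0 vt, (c :: rest).drop s = v0 :: vt := by
            cases hvv : (c :: rest).drop s with
            | nil => exact absurd hvv hvne
            | cons a b => exact ⟨a, b, rfl⟩
          rw [hv, pvAltRest_cons, pv_intercalate_cons, ← pvAltRest_cons, ← hv]

theorem pv_top (s : Nat) (hs : 1 ≤ s) (cs : List Char) :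
    pvALoop s cs.length cs 0 =
      List.intercalate ['\n', ' '] (cs.take (s + 1) :: pvAltRest (s - 1) (cs.drop (s + 1))) := by
  by_cases hlen : cs.length ≤ s + 1
  · have ht : cs.take (s + 1) = cs := List.take_of_length_le hlen
    have hd : cs.drop (s + 1) = [] := List.drop_eq_nil_of_le hlen
    rw [ht, hd, pvAltRest_nil, pv_intercalate_single]
    apply pvALoop_noFold
    intro j hij hjlt hcond
    obtain ⟨hj0, hjne, hjn⟩ := hcond
    have hdvd : s ∣ j := Nat.dvd_of_mod_eq_zero hj0
    have hsj : s ≤ j := Nat.le_of_dvd (by omega) hdvd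
    omega
  · have hul : (cs.take (s + 1)).length = s + 1 := by rw [List.length_take]; omega
    have hsplit : pvALoop s cs.length cs 0
        = pvALoop s cs.length (cs.take (s + 1)) 0 ++ pvALoop s cs.length (cs.drop (s + 1)) (s + 1) := by
      conv_lhs => rw [← List.take_append_drop (s + 1) cs]
      rw [pvALoop_append, hul]
      simp
    have hslt : s < cs.length := by omega
    have hgl : cs[s]? = some (cs[s]'hslt) := List.getElem?_eq_getElem hslt
    have htake : cs.take (s + 1) = cs.take s ++ [cs[s]'hslt] := by
      rw [List.take_succ, hgl]; simp
    have hu'l : (cs.take s).length = s := by rw [List.length_take]; omega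
    have hplain : pvALoop s cs.length (cs.take s) 0 = cs.take s := by
      apply pvALoop_noFold
      intro j hij hjlt hcond
      obtain ⟨hj0, hjne, _⟩ := hcond
      have hdvd : s ∣ j := Nat.dvd_of_mod_eq_zero hj0
      have hsj : s ≤ j := Nat.le_of_dvd (by omega) hdvd
      rw [hu'l] at hjlt
      omega
    have hcond : s % s = 0 ∧ s ≠ 0 ∧ s + 1 < cs.length := by
      refine ⟨Nat.mod_self s, by omega, by omega⟩
    have hchunk : pvALoop s cs.length (cs.take (s + 1)) 0 = cs.take (s + 1) ++ ['\n', ' '] := by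
      conv_lhs => rw [htake]
      rw [pvALoop_append, hu'l, hplain]
      conv_rhs => rw [htake]
      simp only [pvALoop, Nat.zero_add]
      rw [if_pos hcond]
      simp only [List.append_nil, List.append_assoc, List.cons_append, List.nil_append]
    have hIH : pvALoop s cs.length (cs.drop (s + 1)) (s + 1)
        = List.intercalate ['\n', ' '] (pvAltRest (s - 1) (cs.drop (s + 1))) := by
      apply pv_main s cs.length hs (cs.drop (s + 1)).length
      · exact le_rfl
      · omega
      · rw [List.length_drop]; omega
      · exact Nat.add_mod_left s 1
    have hvne : cs.drop (s + 1) ≠ [] := by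
      intro h
      have := congrArg List.length h
      rw [List.length_drop] at this
      simp at this
      omega
    rw [hsplit, hchunk, hIH]
    obtain ⟨v0, vt, hv⟩ : ∃ v0 vt, cs.drop (s + 1) = v0 :: vt := by
      cases hvv : cs.drop (s + 1) with
      | nil => exact absurd hvv hvne
      | cons a b => exact ⟨a, b, rfl⟩
    rw [hv, pvAltRest_cons, pv_intercalate_cons, ← pvAltRest_cons, ← hv]

theorem pv_cond_iff (L : Int) (hL : L ≠ 0) (k len : Nat) :
    (PySem.Int.mod (k : Int) L = 0 ∧ (k : Int) ≠ 0 ∧ (k : Int) < ((len : Nat) : Int) - 1)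
      ↔ (k % L.natAbs = 0 ∧ k ≠ 0 ∧ k + 1 < len) := by
  have hpos : 0 < L.natAbs := Int.natAbs_pos.mpr hL
  have h1 : PySem.Int.mod (k : Int) L = 0 ↔ k % L.natAbs = 0 := by
    rw [PySem.Int.mod_eq_zero_iff_dvd, ← Int.natAbs_dvd, Int.natCast_dvd_natCast]
    exact Nat.dvd_iff_mod_eq_zero
  rw [h1]
  constructor
  · rintro ⟨a, b, c⟩; exact ⟨a, by omega, by omega⟩
  · rintro ⟨a, b, c⟩; exact ⟨a, by omega, by omega⟩

theorem pv_fold_eq_aLoop (cs : List Char) (L : Int) (hL : L ≠ 0) :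
    ∀ (m k : Nat) (acc : List Char), k + m = cs.length →
    (PySem.List.pyRange (k : Int) ((cs.length : Nat) : Int) 1).foldl (fun (out : List Char) (i : Int) =>
        let out := out ++ [PySem.List.pyGetD cs i ' ']
        if PySem.Int.mod i L = 0 ∧ i ≠ 0 ∧ i < ((cs.length : Nat) : Int) - 1 then out ++ ['\n', ' '] else out) acc
      = acc ++ pvALoop L.natAbs cs.length (cs.drop k) k := by
  intro m
  induction m with
  | zero =>
      intro k acc hk
      rw [PySem.List.pyRange_one_eq_nil (by omega)]
      rw [List.drop_of_length_le (by omega)]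
      simp [pvALoop]
  | succ m ih =>
      intro k acc hk
      have hklt : k < cs.length := by omega
      rw [PySem.List.pyRange_one_cons (by exact_mod_cast hklt)]
      rw [List.foldl_cons]
      rw [show (k : Int) + 1 = ((k + 1 : Nat) : Int) by push_cast; ring]
      rw [ih (k + 1) _ (by omega)]
      have hdrop : cs.drop k = cs[k] :: cs.drop (k + 1) := List.drop_eq_getElem_cons hklt
      rw [hdrop]
      have hget : PySem.List.pyGetD cs (k : Int) ' ' = cs[k] := by
        rw [PySem.List.pyGetD_natCast]
        exact List.getD_eq_getElem cs ' ' hklt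
      by_cases hc : k % L.natAbs = 0 ∧ k ≠ 0 ∧ k + 1 < cs.length
      · rw [if_pos ((pv_cond_iff L hL k cs.length).mpr hc)]
        simp [pvALoop, hget, hc]
      · rw [if_neg (fun h => hc ((pv_cond_iff L hL k cs.length).mp h))]
        simp [pvALoop, hget, hc]

-- ===== VERDICT (by name: the statement is the Claim_ definition above) =====
theorem vcard_fold_line_spec : Claim_equal_vcard_fold_line := by
  intro l L _ hPre
  unfold Spec_vcard_fold_line
  show vcard_fold_line l L = vcard_fold_line_alt l L
  by_cases hL : L ≤ 0
  · have hnil : l = "" := by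
      rcases hPre with h | h
      · exact h
      · omega
    subst hnil
    unfold vcard_fold_line vcard_fold_line_alt
    rw [PySem.List.pyRange_one_eq_nil (by simp)]
    rw [if_pos hL]
    rfl
  · have hL1 : 1 ≤ L := by omega
    have hLne : L ≠ 0 := by omega
    have hs : 1 ≤ L.natAbs := Int.natAbs_pos.mpr hLne
    have htn : L.toNat = L.natAbs := by omega
    unfold vcard_fold_line vcard_fold_line_alt
    rw [if_neg (by omega), htn]
    have hfold := pv_fold_eq_aLoop l.toList L hLne l.toList.length 0 [] (by omega)
    simp only [Nat.cast_zero, List.drop_zero, List.nil_append] at hfold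
    rw [hfold, pv_top L.natAbs hs l.toList]

@[simp] theorem vcard_fold_line_raises : Claim_raises_vcard_fold_line := by
  unfold Claim_raises_vcard_fold_line
  exact ⟨by
    intro l L _ hR hP
    rcases hR with ⟨hne, h0⟩
    rcases hP with h | h
    · exact hne h
    · omega, by decide⟩
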